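-- pv_equiv track=rewrite | github.com/Ningxin-Zhong/temporal-contact-inference | contact.py | find_infection_windows
-- ===== SOURCE A (Python) =====
-- def find_infection_windows(vks):
--     """ recording the time period when a human turns to a vampire """
--     iw = {}        # infection window
--     last_time = len(vks)-1
--
--     # determine the definite vampires at last time
--     final_vampires = [p for p in vks[last_time] if vks[last_time][p] == "V"]
--
--     for p in sorted(final_vampires):
--         end = None   # first end time, that is, first t when p is V
--         for t in range(len(vks)):
--             if vks[t][p] == "V":
--                 end = t
--                 break
--
--         start = 0   # first start time: that is, last t < end when p is H
--         for t in range(end -1, -1, -1):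
--             if vks[t][p] == "H":
--                 start = t
--                 break
--
--         iw[p] = (start, end)
--
--     return iw
-- ===== SOURCE B (Python) =====
-- def find_infection_windows(vks):
--     """ recording the time period when a human turns to a vampire """
--     # One forward pass over the whole timeline: for every person seen, track the
--     # time of their last 'H' before their first 'V'; freeze their window at the
--     # first 'V'.  Then report the final-time vampires in sorted order.
--     last_h = {}
--     win = {}
--     for t, row in enumerate(vks):
--         for p, v in row.items():
--             if v == "H":
--                 if p not in win:
--                     last_h[p] = t
--             elif v == "V":
--                 if p not in win:
--                     win[p] = (last_h.get(p, 0), t)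
--     last = vks[-1]
--     return {p: win[p] for p in sorted(last) if last[p] == "V"}
-- ===== Notes on version B (the rewrite author's own statement) =====
-- stated objective: alternative
-- what changed: A loops over the final vampires and rescans the timeline twice per vampire (a forward scan to the first 'V', then a backward scan for the last preceding 'H'); B makes one single forward pass over the whole timeline, maintaining for every person a last-'H' time and freezing that person's window at their first 'V', then reports the sorted final vampires from the finished table.
import Mathlib
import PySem

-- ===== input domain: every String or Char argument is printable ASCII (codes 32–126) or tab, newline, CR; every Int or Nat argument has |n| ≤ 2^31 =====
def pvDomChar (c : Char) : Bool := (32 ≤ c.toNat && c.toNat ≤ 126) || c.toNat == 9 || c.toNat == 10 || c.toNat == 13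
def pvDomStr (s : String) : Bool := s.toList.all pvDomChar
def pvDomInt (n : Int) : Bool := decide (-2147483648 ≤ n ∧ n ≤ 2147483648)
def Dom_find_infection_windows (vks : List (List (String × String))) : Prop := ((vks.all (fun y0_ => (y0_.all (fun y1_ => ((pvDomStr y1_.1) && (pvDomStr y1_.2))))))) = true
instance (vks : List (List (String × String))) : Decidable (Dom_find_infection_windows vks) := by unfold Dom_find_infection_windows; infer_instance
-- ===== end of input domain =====

-- B replaces A's per-vampire double rescans of the timeline by one single pass over
-- the whole timeline that builds every person's window at once (alternative algorithm).

-- ===== PORT A =====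
-- A's inner forward loop: first t with vks[t][p] == "V" (None → none; Python would then raise)
def pvFindEndA (rows : List (List (String × String))) (p : String) : Option Nat :=
  match rows with
  | [] => none
  | r :: rs =>
    if (PySem.Dict.ofList r).getD p "" == "V" then some 0
    else (pvFindEndA rs p).map (· + 1)

-- A's inner backward loop: for t in range(e-1, -1, -1), first t with vks[t][p] == "H", default 0
def pvFindStartA (vks : List (List (String × String))) (p : String) : Nat → Int
  | 0 => 0
  | t + 1 => if (PySem.Dict.ofList (vks.getD t [])).getD p "" == "H" then (t : Int) else pvFindStartA vks p t

-- each Python row is a dict, read as PySem.Dict.ofList; a missing key (Python KeyError) is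
-- read as "", and a missing end (Python TypeError) skips the insertion; both situations are
-- excluded by Pre_find_infection_windows
def find_infection_windows (vks : List (List (String × String))) : List (String × Int × Int) :=
  let lastRow := PySem.Dict.ofList (vks.getD (vks.length - 1) [])
  let finalVampires := lastRow.keys.filter (fun p => lastRow.getD p "" == "V")
  ((PySem.List.sorted finalVampires (fun x => x) false).foldl
    (fun (iw : PySem.Dict String (Int × Int)) p =>
      match pvFindEndA vks p with
      | none => iw
      | some e => iw.insert p (pvFindStartA vks p e, (e : Int)))
    PySem.Dict.empty).items

-- ===== PORT B =====
-- B's per-entry update of the single pass: (last_h, win) dicts, entry (p, v) at time t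
def pvStepB (t : Int)
    (st : PySem.Dict String Int × PySem.Dict String (Int × Int)) (pv : String × String) :
    PySem.Dict String Int × PySem.Dict String (Int × Int) :=
  if pv.2 == "H" then
    (if st.2.contains pv.1 then st else (st.1.insert pv.1 t, st.2))
  else if pv.2 == "V" then
    (if st.2.contains pv.1 then st else (st.1, st.2.insert pv.1 (st.1.getD pv.1 0, t)))
  else st

-- B's inner loop 'for p, v in row.items()'
def pvRowB (st : PySem.Dict String Int × PySem.Dict String (Int × Int))
    (tr : Int × List (String × String)) :
    PySem.Dict String Int × PySem.Dict String (Int × Int) :=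
  ((PySem.Dict.ofList tr.2).items).foldl (pvStepB tr.1) st

-- Python's win[p] in the final comprehension cannot raise (p is "V" in the last row, so the
-- pass has frozen a window for p); the getD default (0, 0) is unreachable there
def find_infection_windows_alt (vks : List (List (String × String))) : List (String × Int × Int) :=
  let st := (PySem.List.enumerate vks 0).foldl pvRowB (PySem.Dict.empty, PySem.Dict.empty)
  let last := PySem.Dict.ofList (vks.getD (vks.length - 1) [])
  (((PySem.List.sorted last.keys (fun x => x) false).filter
      (fun p => last.getD p "" == "V")).foldl
    (fun (r : PySem.Dict String (Int × Int)) p => r.insert p (st.2.getD p (0, 0)))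
    PySem.Dict.empty).items

-- ===== PRECONDITION & SPEC =====
-- crash-freedom of one column: scanning forward, person p must be a key of every row up to and
-- including the first row whose value for p is "V"
def pvColOk : List (List (String × String)) → String → Bool
  | [], _ => true
  | r :: rs, p =>
    match (PySem.Dict.ofList r).get? p with
    | none => false
    | some v => v == "V" || pvColOk rs p

-- Pre_ excludes exactly the inputs where Python A raises: the empty list (IndexError on vks[-1])
-- and inputs where some final vampire lacks a key in a row at or before its first "V" row (KeyError)
def Pre_find_infection_windows (vks : List (List (String × String))) : Prop :=
  vks ≠ [] ∧
  ∀ p ∈ (PySem.Dict.ofList (vks.getD (vks.length - 1) [])).keys,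
    ((PySem.Dict.ofList (vks.getD (vks.length - 1) [])).getD p "" == "V") = true →
    pvColOk vks p = true
instance (vks : List (List (String × String))) : Decidable (Pre_find_infection_windows vks) := by
  unfold Pre_find_infection_windows; infer_instance

def pvWitness_find_infection_windows : (List (List (String × String))) :=
  [[("a", "H"), ("b", "H")], [("a", "V"), ("b", "H")]]

def Spec_find_infection_windows (vks : List (List (String × String))) (out : List (String × Int × Int)) : Prop := out = find_infection_windows_alt vks
instance (vks : List (List (String × String))) (out : List (String × Int × Int)) : Decidable (Spec_find_infection_windows vks out) := by unfold Spec_find_infection_windows; infer_instance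

-- ===== CLAIM (what is proved, stated in full; the proofs are below) =====
def Claim_equal_find_infection_windows : Prop := ∀ (vks : List (List (String × String))), Dom_find_infection_windows vks → Pre_find_infection_windows vks → Spec_find_infection_windows vks (find_infection_windows vks)

-- ===== LEMMAS AND PROOFS =====

-- A's two scans fused (proof-side only): last-H accumulator l, absolute time t0
def pvColScan (rows : List (List (String × String))) (p : String) (t0 : Nat) (l : Int) :
    Option (Int × Int) :=
  match rows with
  | [] => none
  | r :: rs =>
    let v := (PySem.Dict.ofList r).getD p ""
    if v == "H" then pvColScan rs p (t0 + 1) (t0 : Int)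
    else if v == "V" then some (l, (t0 : Int))
    else pvColScan rs p (t0 + 1) l

-- last H among the first e rows (absolute base t0, accumulator l)
def pvLastH : List (List (String × String)) → String → Nat → Nat → Int → Int
  | _, _, 0, _, l => l
  | [], _, _ + 1, _, l => l
  | r :: rs, p, e + 1, t0, l =>
    pvLastH rs p e (t0 + 1) (if (PySem.Dict.ofList r).getD p "" == "H" then (t0 : Int) else l)

theorem pvColScan_eq (rows : List (List (String × String))) (p : String) :
    ∀ (t0 : Nat) (l : Int),
      pvColScan rows p t0 l
        = (pvFindEndA rows p).map (fun e => (pvLastH rows p e t0 l, (t0 : Int) + e)) := by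
  induction rows with
  | nil => intro t0 l; simp [pvColScan, pvFindEndA]
  | cons r rs ih =>
    intro t0 l
    by_cases hV : ((PySem.Dict.ofList r).getD p "" == "V") = true
    · have hH : ((PySem.Dict.ofList r).getD p "" == "H") = false := by
        have := eq_of_beq hV; simp [this]
      simp [pvColScan, pvFindEndA, hV, hH, pvLastH]
    · by_cases hH : ((PySem.Dict.ofList r).getD p "" == "H") = true
      · cases he : pvFindEndA rs p with
        | none => simp [pvColScan, pvFindEndA, hV, hH, ih, he]
        | some e =>
          simp [pvColScan, pvFindEndA, hV, hH, ih, he, pvLastH]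
          omega
      · cases he : pvFindEndA rs p with
        | none => simp [pvColScan, pvFindEndA, hV, hH, ih, he]
        | some e =>
          simp [pvColScan, pvFindEndA, hV, hH, ih, he, pvLastH]
          omega

theorem pvLastH_succ (rows : List (List (String × String))) (p : String) :
    ∀ (e t0 : Nat) (l : Int), e < rows.length →
      pvLastH rows p (e + 1) t0 l
        = if (PySem.Dict.ofList (rows.getD e [])).getD p "" == "H" then ((t0 + e : Nat) : Int)
          else pvLastH rows p e t0 l := by
  induction rows with
  | nil => intro e t0 l h; simp at h
  | cons r rs ih =>
    intro e t0 l h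
    cases e with
    | zero => simp [pvLastH]
    | succ e' =>
      have h' : e' < rs.length := by simpa using h
      have : pvLastH (r :: rs) p (e' + 1 + 1) t0 l
          = pvLastH rs p (e' + 1) (t0 + 1)
              (if (PySem.Dict.ofList r).getD p "" == "H" then (t0 : Int) else l) := rfl
      rw [this, ih _ _ _ h']
      simp [pvLastH]
      split
      · omega
      · rfl

theorem pvLastH_eq_start (vks : List (List (String × String))) (p : String) :
    ∀ (e : Nat), e ≤ vks.length → pvLastH vks p e 0 0 = pvFindStartA vks p e := by
  intro e
  induction e with
  | zero => intro _; cases vks <;> simp [pvLastH, pvFindStartA]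
  | succ e' ih =>
    intro h
    rw [pvLastH_succ vks p e' 0 0 (Nat.lt_of_succ_le h), ih (Nat.le_of_succ_le h)]
    simp [pvFindStartA]

theorem pvFindEndA_lt (rows : List (List (String × String))) (p : String) :
    ∀ (e : Nat), pvFindEndA rows p = some e → e < rows.length := by
  induction rows with
  | nil => intro e h; simp [pvFindEndA] at h
  | cons r rs ih =>
    intro e h
    by_cases hV : ((PySem.Dict.ofList r).getD p "" == "V") = true
    · simp [pvFindEndA, hV] at h
      simp [List.length_cons]; omega
    · simp [pvFindEndA, hV] at h
      obtain ⟨e', he', rfl⟩ := h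
      have := ih e' he'
      simp; omega

theorem pvFindEndA_isSome_of_mem (p : String) :
    ∀ (rows : List (List (String × String))) (r : List (String × String)), r ∈ rows →
      ((PySem.Dict.ofList r).getD p "" == "V") = true → (pvFindEndA rows p).isSome := by
  intro rows
  induction rows with
  | nil => intro r h; simp at h
  | cons r0 rs ih =>
    intro r h hv
    by_cases hV : ((PySem.Dict.ofList r0).getD p "" == "V") = true
    · simp [pvFindEndA, hV]
    · rcases List.mem_cons.mp h with h1 | h1
      · exact absurd (h1 ▸ hv) hV
      · have := ih r h1 hv
        simp [pvFindEndA, hV]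
        simpa using this

-- first-match lookup in a raw item list
def pvAssoc : List (String × String) → String → Option String
  | [], _ => none
  | (k, v) :: rest, p => if k = p then some v else pvAssoc rest p

theorem pvAssoc_of_mem (p v : String) :
    ∀ (its : List (String × String)), (its.map Prod.fst).Nodup → (p, v) ∈ its →
      pvAssoc its p = some v := by
  intro its
  induction its with
  | nil => intro _ h; simp at h
  | cons kv rest ih =>
    intro hnd h
    obtain ⟨k, w⟩ := kv
    rcases List.mem_cons.mp h with h1 | h1
    · injection h1 with h2 h3
      subst h2; subst h3
      simp [pvAssoc]
    · have hk : k ≠ p := by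
        intro he; subst he
        have hm : k ∈ rest.map Prod.fst := List.mem_map.mpr ⟨(k, v), h1, rfl⟩
        simp only [List.map_cons, List.nodup_cons] at hnd
        exact hnd.1 hm
      simp only [pvAssoc, if_neg hk]
      simp only [List.map_cons, List.nodup_cons] at hnd
      exact ih hnd.2 h1

theorem pvAssoc_of_not_mem (p : String) :
    ∀ (its : List (String × String)), p ∉ its.map Prod.fst → pvAssoc its p = none := by
  intro its
  induction its with
  | nil => intro _; rfl
  | cons kv rest ih =>
    intro h
    obtain ⟨k, w⟩ := kv
    simp only [List.map_cons, List.mem_cons, not_or] at h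
    simp only [pvAssoc]
    rw [if_neg (fun he => h.1 he.symm)]
    exact ih h.2

theorem pvAssoc_items (d : PySem.Dict String String) (hnd : d.keys.Nodup) (p : String) :
    pvAssoc d.items p = d.get? p := by
  cases hg : d.get? p with
  | none =>
    exact pvAssoc_of_not_mem p d.items
      (by simpa [PySem.Dict.keys] using (PySem.Dict.get?_eq_none_iff_not_mem_keys d p).mp hg)
  | some v =>
    exact pvAssoc_of_mem p v d.items (by simpa [PySem.Dict.keys] using hnd)
      (PySem.Dict.mem_items_of_get?_eq_some d hg)

-- one pvStepB at a key ≠ p leaves both p-projections alone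
theorem pvStepB_frame (t : Int) (st : PySem.Dict String Int × PySem.Dict String (Int × Int))
    (pv : String × String) (p : String) (h : pv.1 ≠ p) :
    ((pvStepB t st pv).2.get? p = st.2.get? p) ∧ ((pvStepB t st pv).1.getD p 0 = st.1.getD p 0) := by
  have hp : p ≠ pv.1 := Ne.symm h
  unfold pvStepB
  split_ifs <;>
    simp [PySem.Dict.get?_insert_of_ne, PySem.Dict.getD_insert_of_ne, hp]

theorem pvFoldRow_frame (its : List (String × String)) (t : Int) (p : String)
    (h : ∀ k ∈ its.map Prod.fst, k ≠ p) :
    ∀ st, ((its.foldl (pvStepB t) st).2.get? p = st.2.get? p) ∧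
      ((its.foldl (pvStepB t) st).1.getD p 0 = st.1.getD p 0) := by
  induction its with
  | nil => intro st; exact ⟨rfl, rfl⟩
  | cons kv rest ih =>
    intro st
    have hk : kv.1 ≠ p := h kv.1 (by simp)
    have hstep := pvStepB_frame t st kv p hk
    have hrest := ih (fun k hkm => h k (by simp [hkm])) (pvStepB t st kv)
    simp only [List.foldl_cons]
    exact ⟨hrest.1.trans hstep.1, hrest.2.trans hstep.2⟩

-- effect of one row's inner fold on person p, as a function of the row lookup
theorem pvRow_effect (its : List (String × String)) (hnd : (its.map Prod.fst).Nodup)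
    (t : Int) (p : String) :
    ∀ st, ((its.foldl (pvStepB t) st).2.get? p
        = match st.2.get? p with
          | some w => some w
          | none => if pvAssoc its p == some "V" then some (st.1.getD p 0, t) else none) ∧
      ((its.foldl (pvStepB t) st).1.getD p 0
        = if (st.2.get? p).isSome then st.1.getD p 0
          else if pvAssoc its p == some "H" then t else st.1.getD p 0) := by
  induction its with
  | nil =>
    intro st
    cases hw : st.2.get? p <;> simp [pvAssoc, hw]
  | cons kv rest ih =>
    intro st
    obtain ⟨k, v⟩ := kv
    simp only [List.map_cons, List.nodup_cons] at hnd
    by_cases hk : k = p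
    · subst hk
      have hfr : ∀ q ∈ rest.map Prod.fst, q ≠ k := by
        intro q hq he; exact hnd.1 (he ▸ hq)
      have hrest := pvFoldRow_frame rest t k hfr (pvStepB t st (k, v))
      simp only [List.foldl_cons]
      rw [hrest.1, hrest.2]
      cases hw : st.2.get? k with
      | some w =>
        have hc : st.2.contains k = true := by
          rw [PySem.Dict.contains_eq_isSome_get?, hw]; rfl
        unfold pvStepB
        simp [hc, hw]
      | none =>
        have hc : st.2.contains k = false := by
          rw [PySem.Dict.contains_eq_isSome_get?, hw]; rfl
        by_cases hH : v = "H"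
        · subst hH
          unfold pvStepB
          simp [hc, hw, pvAssoc, PySem.Dict.getD_insert_self]
        · by_cases hV : v = "V"
          · subst hV
            unfold pvStepB
            simp [hc, pvAssoc, PySem.Dict.get?_insert_self]
          · unfold pvStepB
            simp [hw, pvAssoc, hH, hV]
    · have hstep := pvStepB_frame t st (k, v) p (by simpa using hk)
      have hrest := ih hnd.2 (pvStepB t st (k, v))
      simp only [List.foldl_cons]
      rw [hrest.1, hrest.2, hstep.1, hstep.2]
      simp only [pvAssoc, if_neg hk]
      exact ⟨trivial, trivial⟩

-- the whole single pass, seen from one person p: it computes pvColScan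
theorem pvFold_win (vks : List (List (String × String))) (p : String) :
    ∀ (t0 : Nat) (st : PySem.Dict String Int × PySem.Dict String (Int × Int)),
      ((PySem.List.enumerate vks (t0 : Int)).foldl pvRowB st).2.get? p
        = match st.2.get? p with
          | some w => some w
          | none => pvColScan vks p t0 (st.1.getD p 0) := by
  induction vks with
  | nil =>
    intro t0 st
    cases hw : st.2.get? p <;> simp [PySem.List.enumerate_nil, pvColScan, hw]
  | cons r rs ih =>
    intro t0 st
    have hnd : (((PySem.Dict.ofList r).items).map Prod.fst).Nodup := by
      have := PySem.Dict.nodup_keys_ofList (ps := r)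
      simpa [PySem.Dict.keys] using this
    have hrow := pvRow_effect ((PySem.Dict.ofList r).items) hnd (t0 : Int) p st
    have hassoc : pvAssoc ((PySem.Dict.ofList r).items) p = (PySem.Dict.ofList r).get? p :=
      pvAssoc_items _ (PySem.Dict.nodup_keys_ofList (ps := r)) p
    have hcast : ((t0 : Int) + 1) = (((t0 + 1 : Nat)) : Int) := by push_cast; ring
    rw [PySem.List.enumerate_cons]
    simp only [List.foldl_cons]
    have hstep : (pvRowB st ((t0 : Int), r))
        = ((PySem.Dict.ofList r).items).foldl (pvStepB (t0 : Int)) st := rfl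
    rw [hstep, hcast, ih (t0 + 1) _]
    rw [hrow.1, hrow.2, hassoc]
    cases hw : st.2.get? p with
    | some w => simp
    | none =>
      cases hg : (PySem.Dict.ofList r).get? p with
      | none =>
        have hget : (PySem.Dict.ofList r).getD p "" = "" := by
          rw [PySem.Dict.getD_eq_get?_getD, hg]; rfl
        simp [pvColScan, hget]
      | some v =>
        have hget : (PySem.Dict.ofList r).getD p "" = v :=
          PySem.Dict.getD_of_get?_eq_some _ _ hg
        by_cases hH : v = "H"
        · subst hH; simp [pvColScan, hget]
        · by_cases hV : v = "V"
          · subst hV; simp [pvColScan, hget]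
          · simp [pvColScan, hget, hH, hV]

-- sorting then filtering = filtering then sorting, on a duplicate-free list
theorem pvSortedFilter (xs : List String) (hnd : xs.Nodup) (q : String → Bool) :
    (PySem.List.sorted xs (fun x => x) false).filter q
      = PySem.List.sorted (xs.filter q) (fun x => x) false := by
  symm
  apply PySem.List.sorted_eq_of_perm_of_pairwise_lt
  · exact (PySem.List.sorted_perm xs (fun x => x) false).filter q
  · have h1 : (PySem.List.sorted xs (fun x => x) false).Pairwise (· ≤ ·) := by
      simpa using PySem.List.sorted_pairwise (xs := xs) (key := fun x => x)
    have h2 : (PySem.List.sorted xs (fun x => x) false).Nodup :=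
      ((PySem.List.sorted_perm xs (fun x => x) false).nodup_iff).mpr hnd
    have h3 : (PySem.List.sorted xs (fun x => x) false).Pairwise (· < ·) := by
      refine (h1.and h2).imp ?_
      rintro a b ⟨hle, hne⟩
      exact lt_of_le_of_ne hle hne
    exact h3.sublist List.filter_sublist

-- ===== VERDICT (by name: the statement is the Claim_ definition above) =====
theorem find_infection_windows_spec : Claim_equal_find_infection_windows := by
  intro vks _ hpre
  unfold Spec_find_infection_windows find_infection_windows find_infection_windows_alt
  dsimp only
  rw [pvSortedFilter _ (PySem.Dict.nodup_keys_ofList (ps := vks.getD (vks.length - 1) []))]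
  refine congrArg PySem.Dict.items ?_
  apply PySem.List.foldl_congr_mem
  intro acc p hp
  have hp' : p ∈ (PySem.Dict.ofList (vks.getD (vks.length - 1) [])).keys ∧
      ((PySem.Dict.ofList (vks.getD (vks.length - 1) [])).getD p "" == "V") = true := by
    have := (PySem.List.mem_sorted _ _ _ _).mp hp
    simpa using List.mem_filter.mp this
  have hlt : vks.length - 1 < vks.length := by
    cases vks with
    | nil => exact absurd rfl hpre.1
    | cons a l => simp
  have hmem : vks.getD (vks.length - 1) [] ∈ vks := by
    rw [List.getD_eq_getElem _ _ hlt]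
    exact List.getElem_mem hlt
  have hsome := pvFindEndA_isSome_of_mem p vks _ hmem hp'.2
  obtain ⟨e, he⟩ := Option.isSome_iff_exists.mp hsome
  have helt : e < vks.length := pvFindEndA_lt vks p e he
  have hwin : ((PySem.List.enumerate vks 0).foldl pvRowB
      (PySem.Dict.empty, PySem.Dict.empty)).2.get? p = some (pvFindStartA vks p e, (e : Int)) := by
    have h0 : ((0 : Nat) : Int) = (0 : Int) := rfl
    have := pvFold_win vks p 0 (PySem.Dict.empty, PySem.Dict.empty)
    rw [h0] at this
    rw [this]
    simp only [PySem.Dict.get?_empty, PySem.Dict.getD_empty]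
    rw [pvColScan_eq vks p 0 0, he]
    simp [pvLastH_eq_start vks p e (le_of_lt helt)]
  rw [he]
  rw [PySem.Dict.getD_of_get?_eq_some _ _ hwin]
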